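-- pv_equiv track=rewrite | github.com/CcarlossC/CCpersonal-repository | PYTHON/intro.py | builtfig
-- ===== SOURCE A (Python) =====
-- def builtfig(caract, base):
--     """
--     A partir de un caracter y tamaño especificado, la funcion
--     construye 3 listas, las cuales al imprimirlas pueden
--     formar un romboide, piramide superior o inferior.
--
--     :param string caract: el caracter con el que se forman las figuras
--     :param integer base: numero de caracteres en la base de la figura
--
--
--     :return list finallist: lista que contiene las 3 listas construidas
--
--     """
--     # Listas que se desean construir
--     piramidesup = []
--     piramideinf = []
--     romboide = []
--     # Herramientas para construir las tres listas anteriores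
--     listaespa = []
--     fila = []
--     primeravez = None
--
--     while base > 0:
--
--         # Se crea el romboide en la primera iteracion
--         if primeravez is None:
--
--             for i in range(base):
--                 fila.append(caract)
--             for i in range(base):
--                 newlineromb = listaespa+fila
--                 listaespa.append(" ")
--                 linestgrombo = "".join(newlineromb)
--                 romboide = romboide + [linestgrombo]
--
--             listaespa = []
--
--             # Para que no sea None en la segunda iteracion
--             primeravez = 1
--
--         else:
--
--             # Se crea la fila siguiente de la figura
--             for i in range(base):
--                 fila.append(caract)
--
--         # Se termina de ajustar la enesima fila de la figura
--         nuevafila = listaespa+fila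
--         listaespa.append(" ")
--         filastring = "".join(nuevafila)
--
--         # Se añade la fila actual a las 2 piramides
--         piramidesup = [filastring] + piramidesup
--         piramideinf = piramideinf + [filastring]
--         fila = []
--         base = base-2
--
--     # Se devuelve una lista con las tres listas construidas
--     finallist = [piramideinf, piramidesup, romboide]
--     return finallist
-- ===== SOURCE B (Python) =====
-- def builtfig(caract, base):
--     # Each of the three figures is computed independently from index formulas.
--     romboide = ["".join([" "] * i + [caract] * base) for i in range(base)]
--     piramideinf = []
--     piramidesup = []
--     for k in range((base + 1) // 2):
--         row = "".join([" "] * k + [caract] * (base - 2 * k))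
--         piramideinf.append(row)
--         piramidesup.insert(0, row)
--     return [piramideinf, piramidesup, romboide]
-- ===== Notes on version B (the rewrite author's own statement) =====
-- stated objective: simpler
-- what changed: Replaced the single stateful while-loop with merged mutable accumulators (fila/listaespa/primeravez flag) by three independent index-driven comprehensions/loops computing each figure's rows by closed formulas.
import Mathlib
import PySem

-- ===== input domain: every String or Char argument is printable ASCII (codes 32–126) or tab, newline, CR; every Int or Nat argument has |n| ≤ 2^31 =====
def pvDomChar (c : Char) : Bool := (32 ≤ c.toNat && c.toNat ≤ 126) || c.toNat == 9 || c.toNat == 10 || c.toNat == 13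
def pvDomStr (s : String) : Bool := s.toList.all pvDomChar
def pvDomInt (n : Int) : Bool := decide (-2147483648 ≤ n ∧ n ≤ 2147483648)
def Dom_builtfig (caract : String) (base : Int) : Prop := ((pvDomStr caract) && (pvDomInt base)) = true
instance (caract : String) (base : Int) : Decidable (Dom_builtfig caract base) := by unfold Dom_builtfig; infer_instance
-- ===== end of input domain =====

-- B replaces A's single merged while-loop (mutable fila/listaespa/primeravez state) by three
-- independent index-formula builds of the figures; objective: simpler, not faster.

-- ===== PORT A =====
-- the while-loop of A, one recursive step per iteration, same state variables
def builtfigLoop (caract : String) (base : Int)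
    (piramidesup piramideinf romboide listaespa fila : List String)
    (primeravez : Option Int) : List String × List String × List String :=
  if _h : base > 0 then
    match primeravez with
    | none =>
        -- first iteration: fill fila, build the whole romboide, reset listaespa
        let fila := (PySem.List.pyRange 0 base 1).foldl (fun f _ => f ++ [caract]) fila
        let rl := (PySem.List.pyRange 0 base 1).foldl
            (fun (p : List String × List String) _ =>
              (p.1 ++ [PySem.Str.join "" (p.2 ++ fila)], p.2 ++ [" "]))
            (romboide, listaespa)
        let filastring := PySem.Str.join "" (([] : List String) ++ fila)
        builtfigLoop caract (base - 2) ([filastring] ++ piramidesup)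
          (piramideinf ++ [filastring]) rl.1 (([] : List String) ++ [" "]) [] (some 1)
    | some _ =>
        let fila := (PySem.List.pyRange 0 base 1).foldl (fun f _ => f ++ [caract]) fila
        let filastring := PySem.Str.join "" (listaespa ++ fila)
        builtfigLoop caract (base - 2) ([filastring] ++ piramidesup)
          (piramideinf ++ [filastring]) romboide (listaespa ++ [" "]) [] primeravez
  else (piramideinf, piramidesup, romboide)
termination_by base.toNat
decreasing_by all_goals omega

def builtfig (caract : String) (base : Int) : List (List String) :=
  let r := builtfigLoop caract base [] [] [] [] [] none
  [r.1, r.2.1, r.2.2]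

-- ===== PORT B =====
def builtfig_alt (caract : String) (base : Int) : List (List String) :=
  let romboide := (PySem.List.pyRange 0 base 1).map
    (fun i => PySem.Str.join "" (List.replicate i.toNat " " ++ List.replicate base.toNat caract))
  let p := (PySem.List.pyRange 0 (PySem.Int.floordiv (base + 1) 2) 1).foldl
    (fun (p : List String × List String) k =>
      let row := PySem.Str.join ""
        (List.replicate k.toNat " " ++ List.replicate (base - 2 * k).toNat caract)
      (p.1 ++ [row], [row] ++ p.2)) ([], [])
  [p.1, p.2, romboide]

-- ===== PRECONDITION & SPEC =====
def Spec_builtfig (caract : String) (base : Int) (out : List (List String)) : Prop := out = builtfig_alt caract base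
instance (caract : String) (base : Int) (out : List (List String)) : Decidable (Spec_builtfig caract base out) := by unfold Spec_builtfig; infer_instance

-- ===== CLAIM (what is proved, stated in full; the proofs are below) =====
def Claim_equal_builtfig : Prop := ∀ (caract : String) (base : Int), Dom_builtfig caract base → Spec_builtfig caract base (builtfig caract base)

-- ===== LEMMAS AND PROOFS =====

-- the pyramid rows A's loop produces from width b with k leading spaces
def pyrRows (caract : String) (b : Int) (k : Nat) : List String :=
  if _h : b > 0 then
    PySem.Str.join "" (List.replicate k " " ++ List.replicate b.toNat caract)
      :: pyrRows caract (b - 2) (k + 1)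
  else []
termination_by b.toNat
decreasing_by all_goals omega

-- generic accumulator shape of A's romboide inner loop
theorem romb_fold (fila : List String) (l : List Int) :
    ∀ (romb spaces : List String),
    l.foldl (fun (p : List String × List String) _ =>
        (p.1 ++ [PySem.Str.join "" (p.2 ++ fila)], p.2 ++ [" "])) (romb, spaces)
    = (romb ++ (List.range l.length).map
        (fun i => PySem.Str.join "" (spaces ++ List.replicate i " " ++ fila)),
       spaces ++ List.replicate l.length " ") := by
  induction l with
  | nil => intro romb spaces; simp
  | cons x xs ih =>
      intro romb spaces
      rw [List.foldl_cons, ih]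
      simp only [List.length_cons, List.range_succ_eq_map]
      refine Prod.ext ?_ ?_
      · simp only [List.map_cons, List.map_map, List.append_assoc, List.singleton_append]
        congr 1
      · simp [List.replicate_succ, List.append_assoc]

-- A's loop after the first iteration, with k spaces accumulated
theorem loopA (caract : String) :
    ∀ (n : Nat) (b : Int), b.toNat ≤ n → ∀ (psup pinf romb : List String) (k : Nat) (z : Int),
    builtfigLoop caract b psup pinf romb (List.replicate k " ") [] (some z)
    = (pinf ++ pyrRows caract b k, (pyrRows caract b k).reverse ++ psup, romb) := by
  intro n
  induction n with
  | zero =>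
      intro b hb psup pinf romb k z
      have hb0 : ¬ b > 0 := by omega
      rw [builtfigLoop, pyrRows]
      simp [hb0]
  | succ n ih =>
      intro b hb psup pinf romb k z
      by_cases hb0 : b > 0
      · rw [builtfigLoop]
        simp only [hb0, dif_pos]
        have hfila : (PySem.List.pyRange 0 b 1).foldl
            (fun f _ => f ++ [caract]) ([] : List String)
            = List.replicate b.toNat caract := by
          rw [PySem.List.foldl_append_singleton_eq_map (fun _ => caract)]
          simp [PySem.List.length_pyRange_one]
        rw [hfila]
        have hsp : List.replicate k " " ++ [" "] = List.replicate (k + 1) " " := by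
          rw [List.replicate_succ']
        rw [hsp]
        rw [ih (b - 2) (by omega)]
        have hrows : pyrRows caract b k
            = PySem.Str.join "" (List.replicate k " " ++ List.replicate b.toNat caract)
              :: pyrRows caract (b - 2) (k + 1) := by
          rw [pyrRows]; simp [hb0]
        rw [hrows]
        simp [List.append_assoc]
      · rw [builtfigLoop, pyrRows]
        simp [hb0]

-- pyrRows as B's closed formula
theorem pyrRows_closed (caract : String) :
    ∀ (n : Nat) (b : Int), b.toNat ≤ n → ∀ (k0 : Nat),
    pyrRows caract b k0
    = (List.range (PySem.Int.floordiv (b + 1) 2).toNat).map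
        (fun j => PySem.Str.join ""
          (List.replicate (k0 + j) " " ++ List.replicate (b - 2 * (j : Int)).toNat caract)) := by
  intro n
  induction n with
  | zero =>
      intro b hb k0
      have hb0 : ¬ b > 0 := by omega
      have hm : (PySem.Int.floordiv (b + 1) 2).toNat = 0 := by
        rw [PySem.Int.floordiv_eq_ediv_of_pos (by norm_num)]
        omega
      rw [pyrRows, hm]
      simp [hb0]
  | succ n ih =>
      intro b hb k0
      by_cases hb0 : b > 0
      · have hm : (PySem.Int.floordiv (b + 1) 2).toNat
            = (PySem.Int.floordiv (b - 1) 2).toNat + 1 := by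
          rw [PySem.Int.floordiv_eq_ediv_of_pos (by norm_num),
            PySem.Int.floordiv_eq_ediv_of_pos (by norm_num)]
          omega
        rw [pyrRows]
        simp only [hb0, dif_pos]
        rw [ih (b - 2) (by omega), hm]
        have hm2 : PySem.Int.floordiv (b - 2 + 1) 2 = PySem.Int.floordiv (b - 1) 2 := by
          have harg : b - 2 + 1 = b - 1 := by ring
          rw [harg]
        rw [hm2, List.range_succ_eq_map]
        simp only [List.map_cons, List.map_map]
        congr 1
        · simp
        apply List.map_congr_left
        intro j _
        have h1 : k0 + 1 + j = k0 + (j + 1) := by omega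
        have h2 : b - 2 - 2 * (j : Int) = b - 2 * (((j : Int)) + 1) := by ring
        simp [Function.comp, h1, h2]
      · have hm : (PySem.Int.floordiv (b + 1) 2).toNat = 0 := by
          rw [PySem.Int.floordiv_eq_ediv_of_pos (by norm_num)]
          omega
        rw [pyrRows, hm]
        simp [hb0]

-- B's pyramid fold builds the row list and its reverse
theorem pyr_fold_B (f : Int → String) (l : List Int) :
    ∀ (a1 a2 : List String),
    l.foldl (fun (p : List String × List String) k => (p.1 ++ [f k], [f k] ++ p.2)) (a1, a2)
    = (a1 ++ l.map f, (l.map f).reverse ++ a2) := by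
  induction l with
  | nil => intro a1 a2; simp
  | cons x xs ih =>
      intro a1 a2
      simp only [List.foldl_cons]
      rw [ih]
      simp [List.append_assoc]

-- ===== VERDICT (by name: the statement is the Claim_ definition above) =====
theorem builtfig_spec : Claim_equal_builtfig := by
  intro caract base _
  unfold Spec_builtfig builtfig builtfig_alt
  by_cases hb : base > 0
  · rw [builtfigLoop]
    simp only [hb, dif_pos]
    have hfila : (PySem.List.pyRange 0 base 1).foldl
        (fun f _ => f ++ [caract]) ([] : List String)
        = List.replicate base.toNat caract := by
      rw [PySem.List.foldl_append_singleton_eq_map (fun _ => caract)]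
      simp [PySem.List.length_pyRange_one]
    rw [hfila, romb_fold]
    have hsp1 : ([] : List String) ++ [" "] = List.replicate 1 " " := by simp
    rw [hsp1]
    rw [loopA caract ((base - 2).toNat) (base - 2) (by omega)]
    have hrows : pyrRows caract base 0
        = PySem.Str.join "" (([] : List String) ++ List.replicate base.toNat caract)
          :: pyrRows caract (base - 2) 1 := by
      rw [pyrRows]
      simp [hb]
    -- romboide sides agree
    have hromb : (List.range (PySem.List.pyRange 0 base 1).length).map
        (fun i => PySem.Str.join "" (([] : List String) ++ List.replicate i " "
          ++ List.replicate base.toNat caract))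
        = (PySem.List.pyRange 0 base 1).map
          (fun i => PySem.Str.join "" (List.replicate i.toNat " "
            ++ List.replicate base.toNat caract)) := by
      rw [PySem.List.pyRange_one]
      simp only [List.length_map, List.length_range, List.map_map]
      apply List.map_congr_left
      intro i _
      simp
    -- pyramid sides agree
    have hpyr : pyrRows caract base 0
        = (PySem.List.pyRange 0 (PySem.Int.floordiv (base + 1) 2) 1).map
          (fun k => PySem.Str.join "" (List.replicate k.toNat " "
            ++ List.replicate (base - 2 * k).toNat caract)) := by
      rw [pyrRows_closed caract base.toNat base (le_refl _) 0]
      rw [PySem.List.pyRange_one]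
      simp only [List.map_map]
      have hnn : 0 ≤ PySem.Int.floordiv (base + 1) 2 := by
        rw [PySem.Int.floordiv_eq_ediv_of_pos (by norm_num)]
        omega
      rw [show ((PySem.Int.floordiv (base + 1) 2) - 0).toNat
          = (PySem.Int.floordiv (base + 1) 2).toNat by omega]
      apply List.map_congr_left
      intro j hj
      simp only [Function.comp]
      rw [List.mem_range] at hj
      simp
    rw [pyr_fold_B]
    simp only [List.nil_append]
    rw [← hpyr, hrows]
    simp only [List.nil_append] at hromb
    rw [PySem.List.length_pyRange_one] at hromb
    simp only [Int.sub_zero] at hromb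
    simp [hromb]
  · rw [builtfigLoop]
    have hm : PySem.Int.floordiv (base + 1) 2 ≤ 0 := by
      rw [PySem.Int.floordiv_eq_ediv_of_pos (by norm_num)]
      omega
    have h1 : PySem.List.pyRange 0 base 1 = [] :=
      PySem.List.pyRange_one_eq_nil (by omega)
    have h2 : PySem.List.pyRange 0 (PySem.Int.floordiv (base + 1) 2) 1 = [] :=
      PySem.List.pyRange_one_eq_nil hm
    rw [h1, h2]
    simp [hb]
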